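-- pv_equiv track=rewrite | github.com/Samhuw8a/AOC_2025 | day_01.py | part_1
-- ===== SOURCE A (Python) =====
-- start: int = 50
--
-- def part_1(lines: list[tuple]) -> int:
--     number = start
--     count = 0
--     for i in lines:
--         dir, am = i
--         if dir == "L":
--             number -= am
--         elif dir == "R":
--             number += am
--         number = number % 100
--
--         if (number == 0):
--             count += 1
--     return count
-- ===== SOURCE B (Python) =====
-- # B: divide-and-conquer over prefix-sum residues instead of A's single accumulating loop.
-- start: int = 50
--
-- def part_1(lines: list[tuple]) -> int:
--     # position after step k = (start + sum of first k deltas) mod 100, so a hit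
--     # at step k  <=>  prefix-sum of deltas == 50 (mod 100).  Count such prefixes
--     # by splitting the list in half: left prefixes keep the base offset, right
--     # prefixes are shifted by the left half's total delta.
--     def delta(step):
--         d, am = step
--         return am if d == "R" else -am if d == "L" else 0
--
--     def count(seg, base):
--         if not seg:
--             return 0
--         if len(seg) == 1:
--             return 1 if (base + delta(seg[0])) % 100 == 50 else 0
--         mid = len(seg) // 2
--         left, right = seg[:mid], seg[mid:]
--         return count(left, base) + count(right, base + sum(map(delta, left)))
--
--     return count(lines, 0)
-- ===== Notes on version B (the rewrite author's own statement) =====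
-- stated objective: alternative
-- what changed: Replaces A's sequential accumulating loop (running position, mod, check each step) with a divide-and-conquer recursion that counts prefixes whose delta-sum is congruent to 50 mod 100, splitting the list in half and shifting the right half's base by the left half's total delta.
import Mathlib
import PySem

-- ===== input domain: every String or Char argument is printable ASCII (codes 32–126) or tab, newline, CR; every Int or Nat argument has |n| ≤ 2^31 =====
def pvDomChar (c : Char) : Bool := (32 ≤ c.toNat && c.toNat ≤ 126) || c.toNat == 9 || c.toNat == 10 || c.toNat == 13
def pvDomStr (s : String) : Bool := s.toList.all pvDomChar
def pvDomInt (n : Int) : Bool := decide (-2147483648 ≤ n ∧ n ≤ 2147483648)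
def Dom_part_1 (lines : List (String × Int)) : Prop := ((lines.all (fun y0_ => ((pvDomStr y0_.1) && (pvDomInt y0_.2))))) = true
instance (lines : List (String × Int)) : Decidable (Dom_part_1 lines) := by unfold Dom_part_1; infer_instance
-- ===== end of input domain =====

-- B replaces A's sequential accumulating loop with a divide-and-conquer count of
-- prefixes whose delta-sum ≡ 50 (mod 100); same results, different algorithm shape.

-- ===== PORT A =====
def part_1_step (st : Int × Int) (i : String × Int) : Int × Int :=
  let n0 := if i.1 == "L" then st.1 - i.2 else if i.1 == "R" then st.1 + i.2 else st.1
  let n := PySem.Int.mod n0 100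
  (n, if n == 0 then st.2 + 1 else st.2)

def part_1 (lines : List (String × Int)) : Int :=
  (lines.foldl part_1_step ((50 : Int), (0 : Int))).2

-- ===== PORT B =====
def part_1_delta (i : String × Int) : Int :=
  if i.1 == "R" then i.2 else if i.1 == "L" then -i.2 else 0

def part_1_count : List (String × Int) → Int → Int
  | [], _ => 0
  | [x], base => if PySem.Int.mod (base + part_1_delta x) 100 == 50 then 1 else 0
  | a :: b :: rest, base =>
      let seg := a :: b :: rest
      let mid := seg.length / 2
      part_1_count (seg.take mid) base +
        part_1_count (seg.drop mid) (base + ((seg.take mid).map part_1_delta).sum)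
termination_by seg _ => seg.length
decreasing_by all_goals (simp [List.length_take]; omega)

def part_1_alt (lines : List (String × Int)) : Int := part_1_count lines 0

-- ===== PRECONDITION & SPEC =====
def Spec_part_1 (lines : List (String × Int)) (out : Int) : Prop := out = part_1_alt lines
instance (lines : List (String × Int)) (out : Int) : Decidable (Spec_part_1 lines out) := by unfold Spec_part_1; infer_instance

-- ===== CLAIM (what is proved, stated in full; the proofs are below) =====
def Claim_equal_part_1 : Prop := ∀ (lines : List (String × Int)), Dom_part_1 lines → Spec_part_1 lines (part_1 lines)

-- ===== LEMMAS AND PROOFS =====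

-- linear reference: counts prefixes of seg whose delta-sum from base hits 50 mod 100
def linCount : List (String × Int) → Int → Int
  | [], _ => 0
  | x :: xs, b => (if (b + part_1_delta x) % 100 = 50 then 1 else 0) + linCount xs (b + part_1_delta x)

theorem linCount_append (l r : List (String × Int)) (b : Int) :
    linCount (l ++ r) b = linCount l b + linCount r (b + (l.map part_1_delta).sum) := by
  induction l generalizing b with
  | nil => simp [linCount]
  | cons x xs ih => simp [linCount, ih, add_assoc]

theorem part_1_count_eq_lin_aux : ∀ (n : Nat) (seg : List (String × Int)) (base : Int),
    seg.length ≤ n → part_1_count seg base = linCount seg base := by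
  intro n
  induction n with
  | zero =>
    intro seg base h
    have : seg = [] := List.length_eq_zero_iff.mp (Nat.le_zero.mp h)
    subst this; simp [part_1_count, linCount]
  | succ n ih =>
    intro seg base h
    match seg with
    | [] => simp [part_1_count, linCount]
    | [x] =>
      simp [part_1_count, linCount]
    | a :: b :: rest =>
      rw [part_1_count]
      have hlen : (a :: b :: rest).length = rest.length + 2 := by simp
      have ht : ((a :: b :: rest).take ((a :: b :: rest).length / 2)).length ≤ n := by
        simp [List.length_take]; omega
      have hd : ((a :: b :: rest).drop ((a :: b :: rest).length / 2)).length ≤ n := by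
        simp at h ⊢; omega
      rw [ih _ _ ht, ih _ _ hd]
      have hsplit := linCount_append ((a :: b :: rest).take ((a :: b :: rest).length / 2))
        ((a :: b :: rest).drop ((a :: b :: rest).length / 2)) base
      rw [List.take_append_drop] at hsplit
      rw [hsplit]

theorem part_1_count_eq_lin (seg : List (String × Int)) (base : Int) :
    part_1_count seg base = linCount seg base :=
  part_1_count_eq_lin_aux seg.length seg base le_rfl

theorem part_1_fold_lin (lines : List (String × Int)) :
    ∀ (n b c : Int), n % 100 = (50 + b) % 100 →
      (lines.foldl part_1_step (n, c)).2 = c + linCount lines b := by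
  induction lines with
  | nil => intro n b c h; simp [linCount]
  | cons i ls ih =>
    intro n b c h
    have hmod : ∀ a : Int, PySem.Int.mod a 100 = a % 100 :=
      fun a => PySem.Int.mod_eq_emod_of_pos (by norm_num)
    have hδ : (if i.1 == "L" then n - i.2 else if i.1 == "R" then n + i.2 else n)
        = n + part_1_delta i := by
      unfold part_1_delta
      by_cases hL : i.1 == "L" <;> by_cases hR : i.1 == "R" <;> simp_all <;> ring
    have hstep : part_1_step (n, c) i =
        ((n + part_1_delta i) % 100,
         if (n + part_1_delta i) % 100 == 0 then c + 1 else c) := by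
      unfold part_1_step; simp only [hδ, hmod]
    simp only [List.foldl_cons, hstep, linCount]
    have hrec : ((n + part_1_delta i) % 100) % 100 = (50 + (b + part_1_delta i)) % 100 := by omega
    rw [ih _ _ _ hrec]
    have hz : ((n + part_1_delta i) % 100 == 0) = ((b + part_1_delta i) % 100 == 50) := by
      by_cases hc : (n + part_1_delta i) % 100 = 0 <;> simp [hc] <;> omega
    rw [hz]
    by_cases hc : (b + part_1_delta i) % 100 = 50 <;> simp [hc] <;> ring

-- ===== VERDICT (by name: the statement is the Claim_ definition above) =====
theorem part_1_spec : Claim_equal_part_1 := by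
  intro lines _
  unfold Spec_part_1 part_1 part_1_alt
  rw [part_1_count_eq_lin]
  simpa using part_1_fold_lin lines 50 0 0 (by norm_num)
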